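-- pv_equiv track=rewrite | github.com/JapneetRajput/MumbaiHacks-24 | Manim-Scripts/bin.py | identify_cousin_groups
-- ===== SOURCE A (Python) =====
-- def identify_cousin_groups(values, level_nodes):
--     """
--     Helper method to identify groups of cousin nodes
--     Returns list of lists, where each inner list contains indices of cousin nodes
--     """
--     cousin_groups = []
--     parent_groups = {}
--
--     # Group nodes by their parent's parent (grandparent)
--     for node in level_nodes:
--         if values[node] is not None:
--             parent = (node - 1) // 2
--             grandparent = (parent - 1) // 2
--
--             if grandparent not in parent_groups:
--                 parent_groups[grandparent] = {}
--
--             if parent not in parent_groups[grandparent]: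
--                 parent_groups[grandparent][parent] = []
--
--             parent_groups[grandparent][parent].append(node)
--
--     # Create cousin groups
--     for grandparent, parents in parent_groups.items():
--         if len(parents) > 1:
--             parent_nodes = list(parents.values())
--             for i in range(len(parent_nodes)):
--                 for j in range(i + 1, len(parent_nodes)):
--                     cousin_groups.append(parent_nodes[i] + parent_nodes[j])
--
--     return cousin_groups
-- ===== SOURCE B (Python) =====
-- def _pairs(xs):
--     """All ordered pairs (xs[i], xs[j]) with i < j, recursively."""
--     if not xs:
--         return []
--     head, rest = xs[0], xs[1:]
--     return [(head, y) for y in rest] + _pairs(rest)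
--
--
-- def identify_cousin_groups(values, level_nodes):
--     # pass 1: flat map parent -> nodes (first-appearance order)
--     by_parent = {}
--     for node in level_nodes:
--         if values[node] is not None:
--             by_parent.setdefault((node - 1) // 2, []).append(node)
--     # pass 2: group parent lists under grandparent
--     by_grandparent = {}
--     for parent, nodes in by_parent.items():
--         by_grandparent.setdefault((parent - 1) // 2, []).append(nodes)
--     # emit one combined list per unordered pair of sibling parents
--     out = []
--     for lists in by_grandparent.values():
--         for a, b in _pairs(lists):
--             out.append(a + b)
--     return out
-- ===== Notes on version B (the rewrite author's own statement) =====
-- stated objective: alternative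
-- what changed: replaces A's nested dict-of-dicts built in one pass (plus an index-based double loop over list(values())) by two flat grouping passes -- parent->nodes, then grandparent->parent-lists -- and a recursive head/rest pair generator instead of the i/j index loops
import Mathlib
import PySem

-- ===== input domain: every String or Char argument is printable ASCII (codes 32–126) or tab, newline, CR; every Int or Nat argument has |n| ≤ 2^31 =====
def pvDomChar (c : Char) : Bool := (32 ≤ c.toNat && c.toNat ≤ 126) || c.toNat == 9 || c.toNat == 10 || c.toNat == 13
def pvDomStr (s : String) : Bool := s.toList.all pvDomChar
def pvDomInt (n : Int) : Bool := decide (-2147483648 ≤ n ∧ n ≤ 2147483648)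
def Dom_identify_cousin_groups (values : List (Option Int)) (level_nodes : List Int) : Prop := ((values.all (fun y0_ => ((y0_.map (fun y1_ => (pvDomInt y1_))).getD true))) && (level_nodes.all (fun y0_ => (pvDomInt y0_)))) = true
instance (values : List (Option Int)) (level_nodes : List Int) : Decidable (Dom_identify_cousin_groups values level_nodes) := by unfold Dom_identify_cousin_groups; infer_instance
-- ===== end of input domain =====

-- B replaces A's one-pass nested dict-of-dicts and index-based double loop by two flat
-- grouping passes (parent → nodes, then grandparent → parent-lists) and a recursive
-- head/rest pair generator; objective: alternative decomposition, same asymptotic cost.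

-- ===== PORT A =====
def identify_cousin_groups (values : List (Option Int)) (level_nodes : List Int) : List (List Int) :=
  -- 'values[node] is not None' is ported with pyGet?; out-of-range indices (IndexError) are excluded by Pre_
  let parent_groups : PySem.Dict Int (PySem.Dict Int (List Int)) :=
    level_nodes.foldl (fun pg node =>
      if ((PySem.List.pyGet? values node).getD none).isSome then
        let parent := PySem.Int.floordiv (node - 1) 2
        let grandparent := PySem.Int.floordiv (parent - 1) 2
        let pg1 := if pg.contains grandparent then pg else pg.insert grandparent PySem.Dict.empty
        let pg2 := if (pg1.getD grandparent PySem.Dict.empty).contains parent then pg1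
                   else pg1.modify grandparent PySem.Dict.empty (fun inner => inner.insert parent [])
        -- 'parent_groups[grandparent][parent].append(node)': both keys are present here,
        -- so modify-with-default is exactly the Python in-place update
        pg2.modify grandparent PySem.Dict.empty (fun inner => inner.modify parent [] (fun l => l ++ [node]))
      else pg) PySem.Dict.empty
  parent_groups.items.foldl (fun cousin_groups gp =>
    if 1 < gp.2.size then
      let parent_nodes := gp.2.values
      (PySem.List.pyRange 0 (PySem.List.len parent_nodes)).foldl (fun acc i =>
        (PySem.List.pyRange (i + 1) (PySem.List.len parent_nodes)).foldl (fun acc2 j =>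
          acc2 ++ [PySem.List.pyGetD parent_nodes i [] ++ PySem.List.pyGetD parent_nodes j []]) acc)
        cousin_groups
    else cousin_groups) []

-- ===== PORT B =====
-- B-side helper: all ordered pairs (xs[i], xs[j]) with i < j, recursively (Source B's _pairs)
def pairsB : List (List Int) → List (List Int × List Int)
  | [] => []
  | x :: xs => xs.map (fun y => (x, y)) ++ pairsB xs

def identify_cousin_groups_alt (values : List (Option Int)) (level_nodes : List Int) : List (List Int) :=
  let by_parent : PySem.Dict Int (List Int) :=
    level_nodes.foldl (fun d node =>
      if ((PySem.List.pyGet? values node).getD none).isSome then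
        -- 'by_parent.setdefault((node-1)//2, []).append(node)'
        d.modify (PySem.Int.floordiv (node - 1) 2) [] (fun l => l ++ [node])
      else d) PySem.Dict.empty
  let by_grandparent : PySem.Dict Int (List (List Int)) :=
    by_parent.items.foldl (fun q pr =>
      q.modify (PySem.Int.floordiv (pr.1 - 1) 2) [] (fun ls => ls ++ [pr.2])) PySem.Dict.empty
  by_grandparent.values.foldl (fun out ls =>
    out ++ (pairsB ls).map (fun pr => pr.1 ++ pr.2)) []

-- ===== PRECONDITION & SPEC =====
-- Pre_ excludes exactly the inputs where Python A raises IndexError: some node in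
-- level_nodes is not a valid (possibly negative) index into values.
def Pre_identify_cousin_groups (values : List (Option Int)) (level_nodes : List Int) : Prop :=
  ∀ n ∈ level_nodes, PySem.Raise.InRange values.length n
instance (values : List (Option Int)) (level_nodes : List Int) : Decidable (Pre_identify_cousin_groups values level_nodes) := by unfold Pre_identify_cousin_groups; infer_instance
def pvWitness_identify_cousin_groups : List (Option Int) × List Int :=
  ([some 1, some 2, some 3, none, some 5, some 6, some 7], [3, 4, 5, 6])

def Spec_identify_cousin_groups (values : List (Option Int)) (level_nodes : List Int) (out : List (List Int)) : Prop := out = identify_cousin_groups_alt values level_nodes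
instance (values : List (Option Int)) (level_nodes : List Int) (out : List (List Int)) : Decidable (Spec_identify_cousin_groups values level_nodes out) := by unfold Spec_identify_cousin_groups; infer_instance

-- ===== CLAIM (what is proved, stated in full; the proofs are below) =====
def Claim_equal_identify_cousin_groups : Prop := ∀ (values : List (Option Int)) (level_nodes : List Int), Dom_identify_cousin_groups values level_nodes → Pre_identify_cousin_groups values level_nodes → Spec_identify_cousin_groups values level_nodes (identify_cousin_groups values level_nodes)

-- ===== LEMMAS AND PROOFS =====

-- getD of a generic group-by-modify fold: the value at c is the fold over the c-keyed subsequence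
theorem pv_getD_foldG {α ν : Type} (l : List α) (kf : α → Int) (f : α → ν → ν) (dflt : ν)
    (d0 : PySem.Dict Int ν) (c : Int) :
    (l.foldl (fun d x => d.modify (kf x) dflt (f x)) d0).getD c dflt
      = (l.filter (fun x => kf x == c)).foldl (fun a x => f x a) (d0.getD c dflt) := by
  induction l generalizing d0 with
  | nil => rfl
  | cons x xs ih =>
    simp only [List.foldl_cons, List.filter_cons]
    rw [ih]
    by_cases h : kf x = c
    · simp [h]
    · simp [h, PySem.Dict.getD_modify, Ne.symm h]

-- items of a generic group-by-modify fold from the empty dict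
theorem pv_items_foldG {α ν : Type} (l : List α) (kf : α → Int) (f : α → ν → ν) (dflt : ν) :
    (l.foldl (fun d x => d.modify (kf x) dflt (f x)) PySem.Dict.empty).items
      = (PySem.Set.ofList (l.map kf)).map
          (fun c => (c, (l.filter (fun x => kf x == c)).foldl (fun a x => f x a) dflt)) := by
  have hkeys : (l.foldl (fun d x => d.modify (kf x) dflt (f x)) PySem.Dict.empty).keys
      = PySem.Set.ofList (l.map kf) := by
    rw [PySem.Dict.keys_foldl_modify_key l kf dflt (fun _ x => f x) PySem.Dict.empty,
      PySem.Dict.keys_empty, PySem.Set.update_nil_left]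
  have hnd : (l.foldl (fun d x => d.modify (kf x) dflt (f x)) PySem.Dict.empty).keys.Nodup :=
    PySem.Dict.nodup_keys_foldl_modify_key l kf dflt (fun _ x => f x) PySem.Dict.empty
      PySem.Dict.nodup_keys_empty
  rw [PySem.Dict.items_eq_map_keys _ hnd dflt, hkeys]
  refine List.map_congr_left (fun c _ => ?_)
  rw [pv_getD_foldG, PySem.Dict.getD_empty]

-- Set.ofList commutes with mapping over a dedup and with filter
theorem pv_ofList_map_ofList (f : Int → Int) (xs : List Int) :
    PySem.Set.ofList ((PySem.Set.ofList xs).map f) = PySem.Set.ofList (xs.map f) := by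
  have hadd : ∀ (s : List Int) (y : Int),
      PySem.Set.ofList ((PySem.Set.add s y).map f) = PySem.Set.add (PySem.Set.ofList (s.map f)) (f y) := by
    intro s y
    by_cases h : y ∈ s
    · have h1 : PySem.Set.add s y = s := by
        simp [PySem.Set.add, PySem.Set.contains, h]
      have h2 : PySem.Set.add (PySem.Set.ofList (s.map f)) (f y) = PySem.Set.ofList (s.map f) := by
        have : f y ∈ PySem.Set.ofList (s.map f) :=
          (PySem.Set.mem_ofList _ _).2 (List.mem_map_of_mem h)
        simp [PySem.Set.add, PySem.Set.contains, this]
      rw [h1, h2]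
    · have h1 : PySem.Set.add s y = s ++ [y] := by
        simp [PySem.Set.add, PySem.Set.contains, h]
      rw [h1]
      simp only [List.map_append, List.map_cons, List.map_nil]
      show List.foldl PySem.Set.add PySem.Set.empty (s.map f ++ [f y]) = _
      rw [List.foldl_append]
      rfl
  have hgen : ∀ (ys : List Int) (s : List Int),
      PySem.Set.ofList ((List.foldl PySem.Set.add s ys).map f)
        = List.foldl PySem.Set.add (PySem.Set.ofList (s.map f)) (ys.map f) := by
    intro ys
    induction ys with
    | nil => intro s; rfl
    | cons y ys ih =>
      intro s
      simp only [List.foldl_cons, List.map_cons]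
      rw [ih (PySem.Set.add s y), hadd s y]
  have := hgen xs []
  simpa [PySem.Set.ofList] using this

theorem pv_filter_ofList (q : Int → Bool) (xs : List Int) :
    (PySem.Set.ofList xs).filter q = PySem.Set.ofList (xs.filter q) := by
  have hadd : ∀ (s : List Int) (y : Int),
      (PySem.Set.add s y).filter q
        = if q y then PySem.Set.add (s.filter q) y else s.filter q := by
    intro s y
    by_cases h : y ∈ s
    · have h1 : PySem.Set.add s y = s := by
        simp [PySem.Set.add, PySem.Set.contains, h]
      by_cases hq : q y
      · have h2 : y ∈ s.filter q := List.mem_filter.2 ⟨h, hq⟩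
        rw [h1]
        simp [hq, PySem.Set.add, PySem.Set.contains, h2]
      · rw [h1]; simp [hq]
    · have h1 : PySem.Set.add s y = s ++ [y] := by
        simp [PySem.Set.add, PySem.Set.contains, h]
      by_cases hq : q y
      · have h2 : y ∉ s.filter q := fun hc => h (List.mem_filter.1 hc).1
        rw [h1]
        simp [hq, List.filter_append, PySem.Set.add, PySem.Set.contains, h2]
      · rw [h1]; simp [hq, List.filter_append]
  have hgen : ∀ (ys : List Int) (s : List Int),
      (List.foldl PySem.Set.add s ys).filter q
        = List.foldl PySem.Set.add (s.filter q) (ys.filter q) := by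
    intro ys
    induction ys with
    | nil => intro s; rfl
    | cons y ys ih =>
      intro s
      simp only [List.foldl_cons, List.filter_cons]
      rw [ih (PySem.Set.add s y), hadd s y]
      by_cases hq : q y <;> simp [hq]
  exact hgen xs []

-- A's i<j double index loop over ls equals B's recursive pair generation
theorem pv_flatMap_range_emit (ls : List (List Int)) :
    (List.range ls.length).flatMap (fun i => (ls.drop (i + 1)).map (fun y => ls.getD i [] ++ y))
      = (pairsB ls).map (fun pr => pr.1 ++ pr.2) := by
  induction ls with
  | nil => rfl
  | cons x xs ih =>
    simp only [List.length_cons, List.range_succ_eq_map, List.flatMap_cons, List.flatMap_map,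
      Nat.succ_eq_add_one]
    have hhead : ((x :: xs).drop (0 + 1)).map (fun y => (x :: xs).getD 0 [] ++ y)
        = xs.map (fun y => x ++ y) := by simp
    have htail : (List.range xs.length).flatMap
          (fun a => ((x :: xs).drop ((a + 1) + 1)).map (fun y => (x :: xs).getD (a + 1) [] ++ y))
        = (List.range xs.length).flatMap
          (fun i => (xs.drop (i + 1)).map (fun y => xs.getD i [] ++ y)) := by
      refine congrFun (congrArg List.flatMap (funext fun a => ?_)) _
      simp
    rw [hhead, htail, ih]
    simp [pairsB, List.map_append, List.map_map, Function.comp]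

theorem pv_doubleLoop_eq (ls : List (List Int)) (acc : List (List Int)) :
    (PySem.List.pyRange 0 (PySem.List.len ls)).foldl (fun acc i =>
        (PySem.List.pyRange (i + 1) (PySem.List.len ls)).foldl (fun acc2 j =>
          acc2 ++ [PySem.List.pyGetD ls i [] ++ PySem.List.pyGetD ls j []]) acc) acc
      = acc ++ (pairsB ls).map (fun pr => pr.1 ++ pr.2) := by
  rw [show PySem.List.len ls = ((ls.length : Nat) : Int) from rfl,
    PySem.List.pyRange_zero_natCast, List.foldl_map]
  have hbody : ∀ (acc : List (List Int)) (k : Nat), k ∈ List.range ls.length →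
      (PySem.List.pyRange ((k : Int) + 1) ((ls.length : Nat) : Int)).foldl (fun acc2 j =>
          acc2 ++ [PySem.List.pyGetD ls (k : Int) [] ++ PySem.List.pyGetD ls j []]) acc
        = acc ++ (ls.drop (k + 1)).map (fun y => ls.getD k [] ++ y) := by
    intro acc k _
    rw [show ((ls.length : Nat) : Int) = PySem.List.len ls from rfl,
      PySem.List.foldl_pyRange_pyGetD ls [] (fun a y => a ++ [PySem.List.pyGetD ls (k : Int) [] ++ y]) acc (by positivity)]
    have : ((k : Int) + 1).toNat = k + 1 := by omega
    rw [this, PySem.List.foldl_append_singleton_eq_map, PySem.List.pyGetD_natCast]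
  rw [PySem.List.foldl_congr_mem _ _ _ _ (fun a k hk => hbody a k hk),
    PySem.List.foldl_append_eq_flatMap, pv_flatMap_range_emit]

-- A's per-node step collapses to one nested modify
theorem pv_stepA_collapse (pg : PySem.Dict Int (PySem.Dict Int (List Int))) (g p n : Int) :
    (let pg1 := if pg.contains g then pg else pg.insert g PySem.Dict.empty
     let pg2 := if (pg1.getD g PySem.Dict.empty).contains p then pg1
                else pg1.modify g PySem.Dict.empty (fun inner => inner.insert p [])
     pg2.modify g PySem.Dict.empty (fun inner => inner.modify p [] (fun l => l ++ [n])))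
      = pg.modify g PySem.Dict.empty (fun inner => inner.modify p [] (fun l => l ++ [n])) := by
  simp only [PySem.Dict.modify]
  by_cases hg : pg.contains g
  · simp only [hg, if_true]
    by_cases hp : (pg.getD g PySem.Dict.empty).contains p
    · simp only [hp, if_true]
    · simp only [hp, if_false, Bool.false_eq_true]
      rw [PySem.Dict.getD_insert_self, PySem.Dict.insert_insert_self]
      congr 1
      rw [PySem.Dict.getD_insert_self, PySem.Dict.insert_insert_self,
        PySem.Dict.getD_of_not_contains _ _ (Bool.eq_false_iff.2 hp)]
  · simp only [hg, if_false, Bool.false_eq_true]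
    rw [PySem.Dict.getD_insert_self, PySem.Dict.getD_of_not_contains _ _ (Bool.eq_false_iff.2 hg),
      PySem.Dict.contains_empty, if_neg (by simp), PySem.Dict.getD_insert_self,
      PySem.Dict.insert_insert_self, PySem.Dict.getD_insert_self, PySem.Dict.insert_insert_self,
      PySem.Dict.insert_insert_self, PySem.Dict.getD_empty]

-- (node - 1) // 2: the parent of node, and also the grandparent of the parent
def pvP (n : Int) : Int := PySem.Int.floordiv (n - 1) 2

-- the nodes the loops actually process: valid index and value not None
def pvNs (values : List (Option Int)) (l : List Int) : List Int :=
  l.filter (fun node => ((PySem.List.pyGet? values node).getD none).isSome)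

def pvEmit (ls : List (List Int)) : List (List Int) := (pairsB ls).map (fun pr => pr.1 ++ pr.2)

-- shared canonical form of both programs' output
def pvCanon (values : List (Option Int)) (l : List Int) : List (List Int) :=
  (PySem.Set.ofList ((pvNs values l).map (fun n => pvP (pvP n)))).flatMap
    (fun c => pvEmit (((PySem.Set.ofList ((pvNs values l).map pvP)).filter (fun p => pvP p == c)).map
      (fun p => (pvNs values l).filter (fun n => pvP n == p))))

-- the per-grandparent body of A's output loop emits exactly pvEmit of the parent lists
theorem pv_bodyA_eq (d : PySem.Dict Int (List Int)) (acc : List (List Int)) :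
    (if 1 < d.size then
      (PySem.List.pyRange 0 (PySem.List.len d.values)).foldl (fun acc i =>
        (PySem.List.pyRange (i + 1) (PySem.List.len d.values)).foldl (fun acc2 j =>
          acc2 ++ [PySem.List.pyGetD d.values i [] ++ PySem.List.pyGetD d.values j []]) acc) acc
    else acc) = acc ++ pvEmit d.values := by
  by_cases h : 1 < d.size
  · rw [if_pos h, pv_doubleLoop_eq]; rfl
  · rw [if_neg h]
    have hlen : d.values.length ≤ 1 := by
      simpa [PySem.Dict.size, PySem.Dict.values] using le_of_not_gt h
    match hv : d.values, hlen with
    | [], _ => simp [pvEmit, pairsB]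
    | [x], _ => simp [pvEmit, pairsB]

theorem pv_A_eq (values : List (Option Int)) (level_nodes : List Int) :
    identify_cousin_groups values level_nodes = pvCanon values level_nodes := by
  have hloop : ∀ l : List Int,
      l.foldl (fun pg node =>
        let parent := PySem.Int.floordiv (node - 1) 2
        let grandparent := PySem.Int.floordiv (parent - 1) 2
        let pg1 := if pg.contains grandparent then pg else pg.insert grandparent PySem.Dict.empty
        let pg2 := if (pg1.getD grandparent PySem.Dict.empty).contains parent then pg1
                   else pg1.modify grandparent PySem.Dict.empty (fun inner => inner.insert parent [])
        pg2.modify grandparent PySem.Dict.empty (fun inner => inner.modify parent [] (fun l => l ++ [node])))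
        PySem.Dict.empty
      = l.foldl (fun pg node =>
          pg.modify (PySem.Int.floordiv (PySem.Int.floordiv (node - 1) 2 - 1) 2) PySem.Dict.empty
            (fun inner => inner.modify (PySem.Int.floordiv (node - 1) 2) [] (fun l => l ++ [node])))
        PySem.Dict.empty := fun l =>
    PySem.List.foldl_congr_mem l _ _ _ (fun acc x _ => pv_stepA_collapse acc _ _ x)
  have houtloop : ∀ items : List (Int × PySem.Dict Int (List Int)),
      items.foldl (fun cousin_groups gp =>
        if 1 < gp.2.size then
          let parent_nodes := gp.2.values
          (PySem.List.pyRange 0 (PySem.List.len parent_nodes)).foldl (fun acc i =>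
            (PySem.List.pyRange (i + 1) (PySem.List.len parent_nodes)).foldl (fun acc2 j =>
              acc2 ++ [PySem.List.pyGetD parent_nodes i [] ++ PySem.List.pyGetD parent_nodes j []]) acc)
            cousin_groups
        else cousin_groups) []
      = items.foldl (fun acc gi => acc ++ pvEmit gi.2.values) [] := fun items =>
    PySem.List.foldl_congr_mem items _ _ _ (fun acc x _ => pv_bodyA_eq x.2 acc)
  unfold identify_cousin_groups
  rw [PySem.List.foldl_if_eq_foldl_filter, hloop, houtloop]
  unfold pvCanon pvNs pvEmit pvP
  simp only [pv_items_foldG, PySem.List.foldl_append_eq_flatMap, List.nil_append,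
    List.flatMap_map, PySem.Dict.values, List.map_map, Function.comp_def,
    List.flatMap_singleton']
  refine congrFun (congrArg List.flatMap (funext fun c => ?_)) _
  congr 1
  congr 1
  have h1 : PySem.Set.ofList ((level_nodes.filter
        (fun node => ((PySem.List.pyGet? values node).getD none).isSome)).filter
          (fun n => PySem.Int.floordiv (PySem.Int.floordiv (n - 1) 2 - 1) 2 == c)
        |>.map (fun n => PySem.Int.floordiv (n - 1) 2))
      = (PySem.Set.ofList ((level_nodes.filter
          (fun node => ((PySem.List.pyGet? values node).getD none).isSome)).map
            (fun n => PySem.Int.floordiv (n - 1) 2))).filter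
          (fun p => PySem.Int.floordiv (p - 1) 2 == c) := by
    rw [pv_filter_ofList, List.filter_map]
    rfl
  rw [h1]
  refine List.map_congr_left fun p hp => ?_
  have hc : (PySem.Int.floordiv (p - 1) 2 == c) = true := (List.mem_filter.1 hp).2
  rw [List.filter_filter]
  refine List.filter_congr fun n _ => ?_
  rcases Bool.eq_false_or_eq_true (PySem.Int.floordiv (n - 1) 2 == p) with h | h
  · rw [h, Bool.true_and, eq_of_beq h]
    exact hc
  · rw [h, Bool.false_and]


theorem pv_B_eq (values : List (Option Int)) (level_nodes : List Int) :
    identify_cousin_groups_alt values level_nodes = pvCanon values level_nodes := by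
  unfold identify_cousin_groups_alt pvCanon pvNs pvEmit pvP
  rw [PySem.List.foldl_if_eq_foldl_filter]
  simp only [pv_items_foldG, PySem.List.foldl_append_singleton_eq_self,
    PySem.List.foldl_append_singleton_eq_map, PySem.Dict.values,
    PySem.List.foldl_append_eq_flatMap, List.nil_append, List.map_map,
    List.flatMap_map, List.filter_map, Function.comp]
  rw [pv_ofList_map_ofList]
  simp only [List.map_map, Function.comp_def]

-- ===== VERDICT (by name: the statement is the Claim_ definition above) =====
theorem identify_cousin_groups_spec : Claim_equal_identify_cousin_groups := by
  intro values level_nodes _ _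
  unfold Spec_identify_cousin_groups
  rw [pv_A_eq, pv_B_eq]
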